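-- pv_equiv track=rewrite | github.com/papik-operativa/papik-web | generate_html.py | strip_top_doc
-- ===== SOURCE A (Python) =====
-- def strip_top_doc(raw: str) -> str:
--     """Strip leading H1 file-title and `>` doc-comment lines until first content."""
--     lines = raw.split("\n")
--     out = []
--     skip_doc = True
--     for ln in lines:
--         if skip_doc:
--             stripped = ln.strip()
--             if stripped.startswith("# ") and not stripped.startswith("## "):
--                 continue
--             if stripped.startswith(">"):
--                 continue
--             if stripped == "":
--                 continue
--             if stripped == "---":
--                 skip_doc = False
--                 continue
--             skip_doc = False
--         out.append(ln)
--     return "\n".join(out)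
-- ===== SOURCE B (Python) =====
-- def strip_top_doc(raw: str) -> str:
--     """Strip leading H1 file-title and `>` doc-comment lines until first content."""
--     lines = raw.split("\n")
--     start = len(lines)
--     for i, ln in enumerate(lines):
--         s = ln.strip()
--         if (s.startswith("# ") and not s.startswith("## ")) or s.startswith(">") or s == "":
--             continue
--         start = i + 1 if s == "---" else i
--         break
--     return "\n".join(lines[start:])
-- ===== Notes on version B (the rewrite author's own statement) =====
-- stated objective: alternative
-- what changed: B finds a boundary index with an early-exit scan and returns a single slice-and-join of the tail, instead of threading a skip flag through one pass that appends kept lines to an accumulator.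
import Mathlib
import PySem

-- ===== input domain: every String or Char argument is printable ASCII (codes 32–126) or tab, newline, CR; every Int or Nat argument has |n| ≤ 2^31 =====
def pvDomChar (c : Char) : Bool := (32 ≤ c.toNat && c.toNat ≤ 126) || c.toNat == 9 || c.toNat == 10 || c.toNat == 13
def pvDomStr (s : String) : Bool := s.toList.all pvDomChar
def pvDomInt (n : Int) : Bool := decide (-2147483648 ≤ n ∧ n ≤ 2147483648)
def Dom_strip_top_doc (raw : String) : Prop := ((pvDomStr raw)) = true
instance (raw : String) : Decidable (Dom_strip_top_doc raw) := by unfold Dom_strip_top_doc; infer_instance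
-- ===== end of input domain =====

-- B computes a boundary index and slices once instead of A's skip-flag accumulating pass; same cost, different decomposition.

-- ===== PORT A =====
-- the for-loop over lines with state (skip_doc, out)
def stripTopDocLoopA : Bool → List String → List String → List String
  | _, out, [] => out
  | skip, out, ln :: rest =>
    if skip then
      let stripped := PySem.Str.strip ln
      if PySem.Str.startswith stripped "# " && !(PySem.Str.startswith stripped "## ") then
        stripTopDocLoopA true out rest
      else if PySem.Str.startswith stripped ">" then
        stripTopDocLoopA true out rest
      else if stripped == "" then
        stripTopDocLoopA true out rest
      else if stripped == "---" then
        stripTopDocLoopA false out rest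
      else
        stripTopDocLoopA false (out ++ [ln]) rest
    else
      stripTopDocLoopA false (out ++ [ln]) rest

-- raw.split("\n"): sep is the non-empty literal "\n", so PySem.Str.split? is always some (getD [] never fires)
def strip_top_doc (raw : String) : String :=
  PySem.Str.join "\n" (stripTopDocLoopA true [] ((PySem.Str.split? raw "\n").getD []))

-- ===== PORT B =====
-- the boundary-finding scan: i is the enumerate counter; returning is the `break` (or loop end)
def stripTopDocFindStart : Nat → List String → Nat
  | i, [] => i
  | i, ln :: rest =>
    let s := PySem.Str.strip ln
    if (PySem.Str.startswith s "# " && !(PySem.Str.startswith s "## ")) ||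
        PySem.Str.startswith s ">" || s == "" then
      stripTopDocFindStart (i + 1) rest
    else if s == "---" then i + 1 else i

def strip_top_doc_alt (raw : String) : String :=
  PySem.Str.join "\n"
    (PySem.List.slice ((PySem.Str.split? raw "\n").getD [])
      (some ((stripTopDocFindStart 0 ((PySem.Str.split? raw "\n").getD []) : Nat) : Int)) none)

-- ===== PRECONDITION & SPEC =====
def Spec_strip_top_doc (raw : String) (out : String) : Prop := out = strip_top_doc_alt raw
instance (raw : String) (out : String) : Decidable (Spec_strip_top_doc raw out) := by unfold Spec_strip_top_doc; infer_instance

-- ===== CLAIM (what is proved, stated in full; the proofs are below) =====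
def Claim_equal_strip_top_doc : Prop := ∀ (raw : String), Dom_strip_top_doc raw → Spec_strip_top_doc raw (strip_top_doc raw)

-- ===== LEMMAS AND PROOFS =====
-- once skip_doc is False, A appends every remaining line
theorem stripTopDocLoopA_false (ls : List String) : ∀ (out : List String),
    stripTopDocLoopA false out ls = out ++ ls := by
  induction ls with
  | nil => intro out; simp [stripTopDocLoopA]
  | cons ln rest ih => intro out; simp [stripTopDocLoopA, ih]

-- the enumerate counter only shifts the result
theorem stripTopDocFindStart_shift (ls : List String) : ∀ (i : Nat),
    stripTopDocFindStart i ls = i + stripTopDocFindStart 0 ls := by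
  induction ls with
  | nil => intro i; simp [stripTopDocFindStart]
  | cons ln rest ih =>
    intro i
    simp only [stripTopDocFindStart]
    split_ifs with h1 h2
    · rw [ih (i+1), ih 1]; omega
    · omega
    · omega

-- A's skip phase drops exactly the first (stripTopDocFindStart 0 ls) lines
theorem stripTopDocLoopA_true (ls : List String) : ∀ (out : List String),
    stripTopDocLoopA true out ls = out ++ ls.drop (stripTopDocFindStart 0 ls) := by
  induction ls with
  | nil => intro out; simp [stripTopDocLoopA, stripTopDocFindStart]
  | cons ln rest ih =>
    intro out
    simp only [stripTopDocLoopA, stripTopDocFindStart, Nat.zero_add]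
    by_cases h1 : (PySem.Str.startswith (PySem.Str.strip ln) "# " &&
        !PySem.Str.startswith (PySem.Str.strip ln) "## ") = true
    · have hB : (PySem.Str.startswith (PySem.Str.strip ln) "# " &&
          !PySem.Str.startswith (PySem.Str.strip ln) "## " ||
          PySem.Str.startswith (PySem.Str.strip ln) ">" ||
          PySem.Str.strip ln == "") = true := by rw [h1]; simp
      rw [if_pos h1, if_pos hB, ih, stripTopDocFindStart_shift rest 1,
        Nat.add_comm, List.drop_succ_cons]
      simp
    · have h1f := Bool.eq_false_iff.mpr h1
      by_cases h2 : PySem.Str.startswith (PySem.Str.strip ln) ">" = true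
      · have hB : (PySem.Str.startswith (PySem.Str.strip ln) "# " &&
            !PySem.Str.startswith (PySem.Str.strip ln) "## " ||
            PySem.Str.startswith (PySem.Str.strip ln) ">" ||
            PySem.Str.strip ln == "") = true := by rw [h1f, h2]; simp
        rw [if_neg h1, if_pos h2, if_pos hB, ih, stripTopDocFindStart_shift rest 1,
          Nat.add_comm, List.drop_succ_cons]
        simp
      · have h2f := Bool.eq_false_iff.mpr h2
        by_cases h3 : (PySem.Str.strip ln == "") = true
        · have hB : (PySem.Str.startswith (PySem.Str.strip ln) "# " &&
              !PySem.Str.startswith (PySem.Str.strip ln) "## " ||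
              PySem.Str.startswith (PySem.Str.strip ln) ">" ||
              PySem.Str.strip ln == "") = true := by rw [h1f, h2f, h3]; simp
          rw [if_neg h1, if_neg h2, if_pos h3, if_pos hB, ih,
            stripTopDocFindStart_shift rest 1, Nat.add_comm, List.drop_succ_cons]
          simp
        · have h3f := Bool.eq_false_iff.mpr h3
          have hB : ¬ (PySem.Str.startswith (PySem.Str.strip ln) "# " &&
              !PySem.Str.startswith (PySem.Str.strip ln) "## " ||
              PySem.Str.startswith (PySem.Str.strip ln) ">" ||
              PySem.Str.strip ln == "") = true := by rw [h1f, h2f, h3f]; simp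
          by_cases h4 : (PySem.Str.strip ln == "---") = true
          · rw [if_neg h1, if_neg h2, if_neg h3, if_pos h4, if_neg hB, if_pos h4,
              stripTopDocLoopA_false]
            rfl
          · rw [if_neg h1, if_neg h2, if_neg h3, if_neg h4, if_neg hB, if_neg h4,
              stripTopDocLoopA_false]
            split <;> simp

-- ===== VERDICT (by name: the statement is the Claim_ definition above) =====
theorem strip_top_doc_spec : Claim_equal_strip_top_doc := by
  intro raw _
  unfold Spec_strip_top_doc strip_top_doc strip_top_doc_alt
  rw [stripTopDocLoopA_true, PySem.List.slice_from_natCast]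
  simp
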